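-- pv_equiv track=rewrite | github.com/gabrieli12/exam | task8-extra.py | func
-- ===== SOURCE A (Python) =====
-- def func(x, n):
--     final_arr = []
--
--     for i in range(x):
--         final_arr.append(1)
--
--     # სიიდან მივწვდი ელემენტებს და ვამატებ სიაში ახალ ელემენტს რომელიც არის სიიდან ბოლო n ელემენტების ჯამი, ინდექსებით
--     while len(final_arr) < n:
--         sum = 0
--         for i in range(1, x + 1):
--             sum += final_arr[-i]
--         final_arr.append(sum)
--
--
--     return final_arr
-- ===== SOURCE B (Python) =====
-- def func(x, n):
--     if x <= 0:
--         # range(x) contributes nothing; each appended term is an empty sum, i.e. 0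
--         return [0] * max(n, 0)
--     arr = [1] * x
--     window = x  # sum of the last x elements of arr
--     while len(arr) < n:
--         arr.append(window)
--         window += window - arr[-x - 1]
--     return arr
-- ===== Notes on version B (the rewrite author's own statement) =====
-- stated objective: alternative
-- what changed: A recomputes the sum of the last x elements with an inner loop on every append; B keeps a running window sum updated incrementally per appended element (and returns zeros directly when x <= 0, where every window sum is empty).
import Mathlib
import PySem

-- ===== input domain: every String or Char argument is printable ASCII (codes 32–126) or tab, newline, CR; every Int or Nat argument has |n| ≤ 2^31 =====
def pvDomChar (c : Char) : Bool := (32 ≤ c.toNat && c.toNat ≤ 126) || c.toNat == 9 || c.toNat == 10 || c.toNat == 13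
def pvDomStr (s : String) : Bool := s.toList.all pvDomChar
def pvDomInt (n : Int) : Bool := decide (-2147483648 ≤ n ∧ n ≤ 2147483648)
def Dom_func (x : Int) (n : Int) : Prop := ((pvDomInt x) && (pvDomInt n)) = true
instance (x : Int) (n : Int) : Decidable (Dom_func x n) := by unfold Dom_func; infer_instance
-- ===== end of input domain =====

-- B replaces A's inner re-summation of the last x elements by a sliding-window sum
-- updated incrementally at each append (objective: alternative algorithm).

-- ===== PORT A =====
-- inner 'for i in range(1, x+1): sum += final_arr[-i]' (index always in range when it runs, so getD 0 is exact)
def funcSum (arr : List Int) (x : Int) : Int :=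
  (PySem.List.pyRange 1 (x + 1) 1).foldl (fun s i => s + (PySem.List.pyGet? arr (-i)).getD 0) 0

-- 'while len(final_arr) < n: … append(sum)'
def funcWhile (arr : List Int) (x : Int) (n : Int) : List Int :=
  if _h : (arr.length : Int) < n then
    funcWhile (arr ++ [funcSum arr x]) x n
  else arr
termination_by (n - arr.length).toNat
decreasing_by simp only [List.length_append, List.length_cons, List.length_nil]; omega

def func (x : Int) (n : Int) : List Int :=
  funcWhile ((PySem.List.pyRange 0 x 1).foldl (fun a _ => a ++ [1]) []) x n

-- ===== PORT B =====
-- 'while len(arr) < n: arr.append(window); window += window - arr[-x-1]'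
def funcAltLoop (arr : List Int) (window : Int) (x : Int) (n : Int) : List Int :=
  if _h : (arr.length : Int) < n then
    funcAltLoop (arr ++ [window])
      (window + (window - (PySem.List.pyGet? (arr ++ [window]) (-x - 1)).getD 0)) x n
  else arr
termination_by (n - arr.length).toNat
decreasing_by simp only [List.length_append, List.length_cons, List.length_nil]; omega

def func_alt (x : Int) (n : Int) : List Int :=
  if x ≤ 0 then List.replicate n.toNat 0
  else funcAltLoop (List.replicate x.toNat 1) x x n

-- ===== PRECONDITION & SPEC =====
def Spec_func (x : Int) (n : Int) (out : List Int) : Prop := out = func_alt x n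
instance (x : Int) (n : Int) (out : List Int) : Decidable (Spec_func x n out) := by unfold Spec_func; infer_instance

-- ===== CLAIM (what is proved, stated in full; the proofs are below) =====
def Claim_equal_func : Prop := ∀ (x : Int) (n : Int), Dom_func x n → Spec_func x n (func x n)

-- ===== LEMMAS AND PROOFS =====

-- A's inner sum is 0 when x ≤ 0 (empty range)
theorem funcSum_nonpos (arr : List Int) (x : Int) (hx : x ≤ 0) : funcSum arr x = 0 := by
  unfold funcSum
  rw [PySem.List.pyRange_one_eq_nil (by omega)]
  rfl

-- with x ≤ 0 A's while loop just appends zeros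
theorem funcWhile_nonpos (x : Int) (hx : x ≤ 0) :
    ∀ (k : Nat) (arr : List Int) (n : Int), (n - arr.length).toNat ≤ k →
      funcWhile arr x n = arr ++ List.replicate (n - arr.length).toNat 0 := by
  intro k
  induction k with
  | zero =>
    intro arr n hk
    rw [funcWhile]
    have h : ¬ ((arr.length : Int) < n) := by omega
    simp [h]
    omega
  | succ k ih =>
    intro arr n hk
    rw [funcWhile]
    by_cases h : (arr.length : Int) < n
    · simp only [h, dif_pos]
      rw [funcSum_nonpos arr x hx, ih (arr ++ [0]) n (by simp; omega)]
      have hlen : ((arr ++ [0]).length : Int) = arr.length + 1 := by simp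
      have h1 : (n - ((arr ++ [0]).length : Int)).toNat + 1 = (n - arr.length).toNat := by
        rw [hlen]; omega
      rw [List.append_assoc, ← h1, List.replicate_succ]
      rfl
    · simp [h]
      omega

-- A's initial for-loop builds x ones
theorem foldl_append_one (l : List Int) (c : List Int) :
    l.foldl (fun a _ => a ++ [(1 : Int)]) c = c ++ List.replicate l.length 1 := by
  induction l generalizing c with
  | nil => simp
  | cons y ys ih =>
    rw [List.foldl_cons, ih, List.append_assoc]
    simp [List.replicate_succ]

-- A's inner sum is the sum of the last x elements (reverse/take form)
theorem funcSum_eq_revTake (arr : List Int) :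
    ∀ (m : Nat) (x : Int), x.toNat = m → 0 ≤ x → x ≤ arr.length →
      funcSum arr x = (arr.reverse.take x.toNat).sum := by
  intro m
  induction m with
  | zero =>
    intro x hm hx0 hxl
    have : x = 0 := by omega
    subst this
    simp [funcSum, PySem.List.pyRange_one_eq_nil]
  | succ m ih =>
    intro x hm hx0 hxl
    have hx1 : 1 ≤ x := by omega
    unfold funcSum
    have hsplit : PySem.List.pyRange 1 (x + 1) 1 = PySem.List.pyRange 1 x 1 ++ [x] := by
      exact PySem.List.pyRange_one_succ_right hx1
    rw [hsplit, List.foldl_append]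
    have ihx : funcSum arr (x - 1) = (arr.reverse.take (x - 1).toNat).sum :=
      ih (x - 1) (by omega) (by omega) (by omega)
    unfold funcSum at ihx
    have hx1eq : (x - 1) + 1 = x := by ring
    rw [hx1eq] at ihx
    rw [ihx]
    simp only [List.foldl_cons, List.foldl_nil]
    -- arr[-x] = arr.reverse[x-1]
    have hxm : x = (m + 1 : Nat) := by omega
    have hget : PySem.List.pyGet? arr (-x) = arr[arr.length - (m + 1)]? := by
      rw [hxm]
      exact PySem.List.pyGet?_neg_natCast arr (m + 1) (by omega) (by omega)
    have hmn : m + 1 ≤ arr.length := by omega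
    have htake : arr.reverse.take x.toNat = arr.reverse.take m ++ [arr.reverse[m]'(by simp; omega)] := by
      have : x.toNat = m + 1 := by omega
      rw [this, List.take_add_one, List.getElem?_eq_getElem (by simp; omega)]
      rfl
    have hx1toNat : (x - 1).toNat = m := by omega
    rw [htake, hx1toNat, List.sum_append, List.sum_cons, List.sum_nil, hget]
    have hrev : arr.reverse[m]'(by simp; omega) = arr[arr.length - 1 - m]'(by omega) :=
      List.getElem_reverse _
    rw [List.getElem?_eq_getElem (by omega)]
    have : arr.length - (m + 1) = arr.length - 1 - m := by omega
    simp [hrev, this]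

-- sliding-window step: B's O(1) update computes A's next inner sum
theorem funcSum_slide (arr : List Int) (x : Int) (w : Int)
    (hx : 1 ≤ x) (hl : x ≤ arr.length) (hw : w = funcSum arr x) :
    w + (w - (PySem.List.pyGet? (arr ++ [w]) (-x - 1)).getD 0) = funcSum (arr ++ [w]) x := by
  have hxm : ∃ m : Nat, x = (m + 1 : Nat) := ⟨x.toNat - 1, by omega⟩
  obtain ⟨m, rfl⟩ := hxm
  have hml : m + 1 ≤ arr.length := by exact_mod_cast hl
  -- rewrite both funcSums via the reverse/take characterisation
  rw [funcSum_eq_revTake arr (m + 1) _ (by simp) (by omega) hl] at hw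
  rw [funcSum_eq_revTake (arr ++ [w]) (m + 1) _ (by simp) (by omega) (by simp; omega)]
  have hrev : (arr ++ [w]).reverse = w :: arr.reverse := by simp
  have htoNat : ((m + 1 : Nat) : Int).toNat = m + 1 := by omega
  rw [hrev, htoNat, List.take_succ_cons, List.sum_cons]
  -- the element leaving the window
  have hget : PySem.List.pyGet? (arr ++ [w]) (-((m + 1 : Nat) : Int) - 1)
      = (arr ++ [w])[(arr ++ [w]).length - (m + 2)]? := by
    have : (-((m + 1 : Nat) : Int) - 1) = -((m + 2 : Nat) : Int) := by push_cast; ring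
    rw [this]
    exact PySem.List.pyGet?_neg_natCast _ (m + 2) (by omega) (by simp; omega)
  rw [hget] at *
  have hidx : (arr ++ [w]).length - (m + 2) = arr.length - (m + 1) := by simp
  have hidx2 : arr.length - (m + 1) < arr.length := by omega
  have hgetv : (arr ++ [w])[(arr ++ [w]).length - (m + 2)]? = some (arr[arr.length - (m + 1)]'hidx2) := by
    rw [hidx, List.getElem?_append_left hidx2, List.getElem?_eq_getElem hidx2]
  rw [hgetv] at *
  -- window sums at m+1 vs m differ by that element
  rw [htoNat] at hw
  have hsum : (arr.reverse.take (m + 1)).sum = (arr.reverse.take m).sum + arr[arr.length - (m + 1)]'hidx2 := by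
    rw [List.take_add_one, List.getElem?_eq_getElem (by simp; omega), List.sum_append]
    have hrv : arr.reverse[m]'(by simp; omega) = arr[arr.length - 1 - m]'(by omega) :=
      List.getElem_reverse _
    have : arr.length - 1 - m = arr.length - (m + 1) := by omega
    simp [hrv, this]
  rw [hw, hsum]
  simp

-- with x ≥ 1 and window invariant, the two loops agree
theorem loops_eq (x : Int) (hx : 1 ≤ x) :
    ∀ (k : Nat) (arr : List Int) (n : Int), x ≤ arr.length → (n - arr.length).toNat ≤ k →
      funcWhile arr x n = funcAltLoop arr (funcSum arr x) x n := by
  intro k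
  induction k with
  | zero =>
    intro arr n hl hk
    rw [funcWhile, funcAltLoop]
    have h : ¬ ((arr.length : Int) < n) := by omega
    simp [h]
  | succ k ih =>
    intro arr n hl hk
    rw [funcWhile, funcAltLoop]
    by_cases h : (arr.length : Int) < n
    · simp only [h, dif_pos]
      rw [funcSum_slide arr x (funcSum arr x) hx hl rfl]
      exact ih (arr ++ [funcSum arr x]) n (by simp; omega) (by simp; omega)
    · simp [h]

-- initial window: sum of the last x elements of x ones is x
theorem funcSum_replicate (x : Int) (hx : 1 ≤ x) :
    funcSum (List.replicate x.toNat 1) x = x := by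
  have h := funcSum_eq_revTake (List.replicate x.toNat 1) x.toNat x rfl (by omega)
    (by simp only [List.length_replicate]; omega)
  rw [h]
  rw [List.reverse_replicate, List.take_replicate, min_self, List.sum_replicate]
  simp
  omega

-- ===== VERDICT (by name: the statement is the Claim_ definition above) =====
theorem func_spec : Claim_equal_func := by
  intro x n _
  unfold Spec_func func func_alt
  by_cases hx : x ≤ 0
  · -- A builds nothing, then appends empty sums (= 0) until length n
    have hinit : PySem.List.pyRange 0 x 1 = [] := PySem.List.pyRange_one_eq_nil (by omega)
    rw [hinit]
    simp only [List.foldl_nil, if_pos hx]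
    rw [funcWhile_nonpos x hx (n - ([] : List Int).length).toNat [] n le_rfl]
    simp
  · have hx1 : 1 ≤ x := by omega
    rw [foldl_append_one, PySem.List.length_pyRange_one]
    have hlen0 : (x - 0).toNat = x.toNat := by omega
    rw [hlen0, if_neg hx, List.nil_append]
    rw [loops_eq x hx1 (n - (List.replicate x.toNat (1:Int)).length).toNat _ n (by simp only [List.length_replicate]; omega) le_rfl]
    rw [funcSum_replicate x hx1]
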